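-- pv_equiv track=rewrite | github.com/maxatwork/synapse | synapse/replication/tcp/resource.py | _updates_to_token_rows
-- ===== SOURCE A (Python) =====
-- def _updates_to_token_rows(updates):
--     if not updates:
--         return []
--
--     new_updates = []
--     for i, update in enumerate(updates[:-1]):
--         if update[0] == updates[i + 1][0]:
--             new_updates.append((None, update[1]))
--         else:
--             new_updates.append(update)
--
--     new_updates.append(updates[-1])
--     return new_updates
-- ===== SOURCE B (Python) =====
-- def _updates_to_token_rows(updates):
--     # Group-first traversal: split the list into maximal runs of equal token,
--     # blank the token on every member of a run except its last.
--     rows = []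
--     i = 0
--     n = len(updates)
--     while i < n:
--         tok = updates[i][0]
--         j = i
--         while j + 1 < n and updates[j + 1][0] == tok:
--             j += 1
--         for u in updates[i:j]:
--             rows.append((None, u[1]))
--         rows.append(updates[j])
--         i = j + 1
--     return rows
-- ===== Notes on version B (the rewrite author's own statement) =====
-- stated objective: alternative
-- what changed: Replaces the flat look-ahead-by-index loop (compare each row with updates[i+1]) by a two-level traversal: split the list into maximal runs of equal token, then emit (None, data) for every run member except the last, which is kept.
import Mathlib
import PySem

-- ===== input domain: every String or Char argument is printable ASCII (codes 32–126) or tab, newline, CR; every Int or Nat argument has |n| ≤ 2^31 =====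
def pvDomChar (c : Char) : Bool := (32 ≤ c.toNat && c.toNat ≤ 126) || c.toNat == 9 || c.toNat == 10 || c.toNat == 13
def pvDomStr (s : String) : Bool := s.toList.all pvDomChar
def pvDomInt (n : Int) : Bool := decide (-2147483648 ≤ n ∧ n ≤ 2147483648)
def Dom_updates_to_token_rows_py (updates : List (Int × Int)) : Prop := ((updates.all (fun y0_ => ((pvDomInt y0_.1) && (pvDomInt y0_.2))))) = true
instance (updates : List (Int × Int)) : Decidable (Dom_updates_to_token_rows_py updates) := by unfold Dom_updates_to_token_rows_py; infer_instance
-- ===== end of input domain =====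

-- B replaces A's flat look-ahead-by-index loop with a run-splitting two-level traversal; same cost, alternative structure.

-- ===== PORT A =====
-- literal transliteration of A: enumerate over updates[:-1], compare with updates[i+1], append (None, data) or
-- the row itself, then append updates[-1].  The indices i+1 and -1 are always in range where the Python
-- evaluates them, so pyGetD's default (0, 0) is never used.
def updates_to_token_rows_py (updates : List (Int × Int)) : List (Option Int × Int) :=
  if updates = [] then []
  else
    let new_updates :=
      (PySem.List.enumerate (PySem.List.slice updates none (some (-1))) 0).foldl
        (fun acc iu =>
          if iu.2.1 == (PySem.List.pyGetD updates (iu.1 + 1) (0, 0)).1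
          then acc ++ [((none : Option Int), iu.2.2)]
          else acc ++ [(some iu.2.1, iu.2.2)]) []
    let last := PySem.List.pyGetD updates (-1) (0, 0)
    new_updates ++ [(some last.1, last.2)]

-- ===== PORT B =====
-- Source B's inner while loop: longest prefix of xs whose rows have token t, and the remainder
def pvSpanTok (t : Int) : List (Int × Int) → List (Int × Int) × List (Int × Int)
  | [] => ([], [])
  | x :: xs =>
    if x.1 == t then
      let p := pvSpanTok t xs
      (x :: p.1, p.2)
    else ([], x :: xs)

-- termination fact for pvRuns (cited by name in its decreasing_by)
theorem pvSpanTok_snd_length (t : Int) (xs : List (Int × Int)) :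
    (pvSpanTok t xs).2.length ≤ xs.length := by
  induction xs with
  | nil => simp [pvSpanTok]
  | cons x xs ih =>
    simp only [pvSpanTok]
    split
    · simpa using Nat.le_succ_of_le ih
    · simp

-- Source B's outer while loop: split the list into maximal runs of equal token
def pvRuns : List (Int × Int) → List (List (Int × Int))
  | [] => []
  | x :: xs =>
    let p := pvSpanTok x.1 xs
    (x :: p.1) :: pvRuns p.2
termination_by l => l.length
decreasing_by
  simpa using Nat.lt_succ_of_le (pvSpanTok_snd_length x.1 xs)

-- Source B's per-run body: blank the token of every run member except the last
def pvMark : List (Int × Int) → List (Option Int × Int)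
  | [] => []
  | [u] => [(some u.1, u.2)]
  | u :: v :: rest => ((none : Option Int), u.2) :: pvMark (v :: rest)

def updates_to_token_rows_py_alt (updates : List (Int × Int)) : List (Option Int × Int) :=
  (pvRuns updates).flatMap pvMark

-- ===== PRECONDITION & SPEC =====
def Spec_updates_to_token_rows_py (updates : List (Int × Int)) (out : List (Option Int × Int)) : Prop := out = updates_to_token_rows_py_alt updates
instance (updates : List (Int × Int)) (out : List (Option Int × Int)) : Decidable (Spec_updates_to_token_rows_py updates out) := by unfold Spec_updates_to_token_rows_py; infer_instance

-- ===== CLAIM (what is proved, stated in full; the proofs are below) =====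
def Claim_equal_updates_to_token_rows_py : Prop := ∀ (updates : List (Int × Int)), Dom_updates_to_token_rows_py updates → Spec_updates_to_token_rows_py updates (updates_to_token_rows_py updates)

-- ===== LEMMAS AND PROOFS =====

-- reference function both ports are reduced to: compare each row with the next one
def pvSpec : List (Int × Int) → List (Option Int × Int)
  | [] => []
  | [u] => [(some u.1, u.2)]
  | u :: v :: rest =>
    (if u.1 = v.1 then ((none : Option Int), u.2) else (some u.1, u.2)) :: pvSpec (v :: rest)

-- the per-element function of A's loop, once the foldl-of-appends is seen as a map
def pvGA (full : List (Int × Int)) (iu : Int × (Int × Int)) : Option Int × Int :=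
  if iu.2.1 == (PySem.List.pyGetD full (iu.1 + 1) (0, 0)).1
  then ((none : Option Int), iu.2.2) else (some iu.2.1, iu.2.2)

theorem pvA_unfold (u : Int × Int) (us : List (Int × Int)) :
    updates_to_token_rows_py (u :: us)
      = (PySem.List.enumerate ((u :: us).dropLast) 0).map (pvGA (u :: us))
        ++ [(some ((u :: us).getLast (by simp)).1, ((u :: us).getLast (by simp)).2)] := by
  simp only [updates_to_token_rows_py, if_neg (List.cons_ne_nil u us),
    PySem.List.slice_to_neg_one]
  have hfun : (fun (acc : List (Option Int × Int)) (iu : Int × (Int × Int)) =>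
        if iu.2.1 == (PySem.List.pyGetD (u :: us) (iu.1 + 1) (0, 0)).1
        then acc ++ [((none : Option Int), iu.2.2)]
        else acc ++ [(some iu.2.1, iu.2.2)])
      = fun acc iu => acc ++ [pvGA (u :: us) iu] := by
    funext acc iu
    unfold pvGA
    split <;> rfl
  rw [hfun, PySem.List.foldl_append_singleton_eq_map,
    PySem.List.pyGetD_neg_one (u :: us) (0, 0) (by simp)]
  simp

theorem pvGA_shift (a : Int × Int) (full : List (Int × Int)) (d : List (Int × Int)) (s : Nat) :
    (PySem.List.enumerate d ((s : Int) + 1)).map (pvGA (a :: full))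
      = (PySem.List.enumerate d (s : Int)).map (pvGA full) := by
  induction d generalizing s with
  | nil => simp [PySem.List.enumerate]
  | cons x d ih =>
    rw [PySem.List.enumerate_cons, PySem.List.enumerate_cons, List.map_cons, List.map_cons]
    have h1 : ((s : Int) + 1 + 1) = (((s + 1 : Nat) : Int) + 1) := by push_cast; ring
    have h2 : ((s : Int) + 1) = ((s + 1 : Nat) : Int) := by push_cast; ring
    have hhead : pvGA (a :: full) ((s : Int) + 1, x) = pvGA full ((s : Int), x) := by
      unfold pvGA
      have hg : PySem.List.pyGetD (a :: full) ((s : Int) + 1 + 1) (0, 0)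
          = PySem.List.pyGetD full ((s : Int) + 1) (0, 0) := by
        have e1 : ((s : Int) + 1 + 1) = ((s + 2 : Nat) : Int) := by push_cast; ring
        rw [e1, h2, PySem.List.pyGetD_natCast, PySem.List.pyGetD_natCast]
        simp [List.getD]
      simp only [hg]
    rw [hhead, h1, h2, ih]

theorem pvA_eq_spec : ∀ (us : List (Int × Int)) (u : Int × Int),
    updates_to_token_rows_py (u :: us) = pvSpec (u :: us) := by
  intro us
  induction us with
  | nil =>
    intro u
    rw [pvA_unfold]
    simp [pvSpec]
  | cons v rest ih =>
    intro u
    rw [pvA_unfold]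
    have hd : (u :: v :: rest).dropLast = u :: (v :: rest).dropLast := by simp
    rw [hd, PySem.List.enumerate_cons, List.map_cons]
    have hz : ((0 : Int) + 1) = (((0 : Nat) : Int) + 1) := by norm_num
    rw [hz, pvGA_shift u (v :: rest) ((v :: rest).dropLast) 0]
    have hhead : pvGA (u :: v :: rest) (0, u)
        = (if u.1 = v.1 then ((none : Option Int), u.2) else (some u.1, u.2)) := by
      unfold pvGA
      have e : (((0 : Int), u).1 + 1) = ((1 : Nat) : Int) := by norm_num
      rw [e, PySem.List.pyGetD_natCast]
      simp [List.getD]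
    have hlast : (u :: v :: rest).getLast (by simp) = (v :: rest).getLast (by simp) := by
      simp [List.getLast]
    rw [hhead, hlast]
    show _ :: ((PySem.List.enumerate ((v :: rest).dropLast) ((0 : Nat) : Int)).map (pvGA (v :: rest))
        ++ [(some ((v :: rest).getLast (by simp)).1, ((v :: rest).getLast (by simp)).2)])
      = pvSpec (u :: v :: rest)
    rw [show (((0 : Nat) : Int)) = (0 : Int) by norm_num, ← pvA_unfold v rest, ih v]
    rfl

theorem pvB_eq_spec : ∀ (us : List (Int × Int)) (u : Int × Int),
    updates_to_token_rows_py_alt (u :: us) = pvSpec (u :: us) := by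
  intro us
  induction us with
  | nil =>
    intro u
    simp [updates_to_token_rows_py_alt, pvRuns, pvSpanTok, pvMark, pvSpec]
  | cons v rest ih =>
    intro u
    by_cases h : v.1 = u.1
    · have hspan : pvSpanTok u.1 (v :: rest)
          = (v :: (pvSpanTok u.1 rest).1, (pvSpanTok u.1 rest).2) := by
        simp [pvSpanTok, h]
      have hA : updates_to_token_rows_py_alt (u :: v :: rest)
          = ((none : Option Int), u.2) :: (pvMark (v :: (pvSpanTok u.1 rest).1)
              ++ (pvRuns (pvSpanTok u.1 rest).2).flatMap pvMark) := by
        simp only [updates_to_token_rows_py_alt]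
        rw [pvRuns, hspan]
        simp [pvMark]
      have hB : updates_to_token_rows_py_alt (v :: rest)
          = pvMark (v :: (pvSpanTok u.1 rest).1)
              ++ (pvRuns (pvSpanTok u.1 rest).2).flatMap pvMark := by
        simp only [updates_to_token_rows_py_alt]
        rw [pvRuns, h]
        simp
      rw [hA, ← hB, ih v]
      simp [pvSpec, h.symm]
    · have hspan : pvSpanTok u.1 (v :: rest) = ([], v :: rest) := by
        simp [pvSpanTok, h]
      have hA : updates_to_token_rows_py_alt (u :: v :: rest)
          = (some u.1, u.2) :: updates_to_token_rows_py_alt (v :: rest) := by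
        simp only [updates_to_token_rows_py_alt]
        rw [pvRuns, hspan]
        simp [pvMark]
      rw [hA, ih v]
      have : ¬ u.1 = v.1 := fun hc => h hc.symm
      simp [pvSpec, this]

-- ===== VERDICT (by name: the statement is the Claim_ definition above) =====
theorem updates_to_token_rows_py_spec : Claim_equal_updates_to_token_rows_py := by
  intro updates _
  unfold Spec_updates_to_token_rows_py
  cases updates with
  | nil => simp [updates_to_token_rows_py, updates_to_token_rows_py_alt, pvRuns]
  | cons u us => rw [pvA_eq_spec, pvB_eq_spec]
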